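-- pv_equiv track=rewrite | github.com/RohanAdwankar/cinfer | scripts/validate_python_gbnf.py | extract_refs
-- ===== SOURCE A (Python) =====
-- from typing import Iterable, List, Optional, Tuple
--
-- def extract_refs(rhs: str) -> List[str]:
--     refs: List[str] = []
--     buf: List[str] = []
--     in_quote = False
--     in_class = False
--
--     def flush() -> None:
--         if buf:
--             token = "".join(buf)
--             if token and token[0].islower():
--                 refs.append(token)
--             buf.clear()
--
--     i = 0
--     while i < len(rhs):
--         c = rhs[i]
--         if in_quote:
--             if c == "\\":
--                 i += 2
--                 continue
--             if c == '"':
--                 in_quote = False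
--             i += 1
--             continue
--         if in_class:
--             if c == "\\":
--                 i += 2
--                 continue
--             if c == "]":
--                 in_class = False
--             i += 1
--             continue
--         if c == '"':
--             flush()
--             in_quote = True
--             i += 1
--             continue
--         if c == "[":
--             flush()
--             in_class = True
--             i += 1
--             continue
--         if c.isalnum() or c == "-":
--             buf.append(c)
--         else:
--             flush()
--         i += 1
--     flush()
--     return refs
-- ===== SOURCE B (Python) =====
-- def extract_refs(rhs):
--     # Phase 1: mask quoted strings / bracket classes down to a single space each.
--     masked = []
--     i = 0
--     n = len(rhs)
--     while i < n:
--         c = rhs[i]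
--         if c == '"' or c == '[':
--             close = '"' if c == '"' else ']'
--             i += 1
--             while i < n:
--                 if rhs[i] == '\\':
--                     i += 2
--                 elif rhs[i] == close:
--                     i += 1
--                     break
--                 else:
--                     i += 1
--             masked.append(' ')
--         else:
--             masked.append(c)
--             i += 1
--     # Phase 2: stateless token scan over the masked text.
--     refs = []
--     buf = ''
--     for c in masked + [' ']:
--         if c.isalnum() or c == '-':
--             buf += c
--         else:
--             if buf and buf[0].islower():
--                 refs.append(buf)
--             buf = ''
--     return refs
-- ===== Notes on version B (the rewrite author's own statement) =====
-- stated objective: simpler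
-- what changed: A's single stateful scan (in_quote/in_class flags interleaved with token buffering) is split into two independent passes: first mask each quoted string or bracket class down to one space, then a stateless scan that collects alphanumeric-or-hyphen runs starting with a lowercase letter.
import Mathlib
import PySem

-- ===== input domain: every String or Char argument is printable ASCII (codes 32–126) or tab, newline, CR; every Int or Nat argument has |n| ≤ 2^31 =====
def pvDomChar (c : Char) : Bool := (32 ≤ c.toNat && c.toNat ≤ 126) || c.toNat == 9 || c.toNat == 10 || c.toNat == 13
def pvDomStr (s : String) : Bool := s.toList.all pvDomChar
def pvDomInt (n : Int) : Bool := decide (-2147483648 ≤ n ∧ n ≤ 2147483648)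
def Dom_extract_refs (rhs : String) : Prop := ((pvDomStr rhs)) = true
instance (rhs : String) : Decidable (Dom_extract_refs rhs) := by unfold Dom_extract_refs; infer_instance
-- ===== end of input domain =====

-- B re-decomposes A's single stateful scan into two passes (mask quoted/class regions to a space, then a stateless token scan); objective: simpler.

-- shared by both ports: "c.isalnum() or c == '-'" and the flush step "if buf and buf[0].islower(): refs.append(token)"
def pvTok (c : Char) : Bool := PySem.Chars.isalnum c || c = '-'

def pvFlush (buf : List Char) (refs : List String) : List String :=
  match buf with
  | [] => refs
  | c :: _ => if PySem.Chars.islower c then refs ++ [String.ofList buf] else refs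

-- ===== PORT A =====
-- A's while loop over i with states in_quote/in_class; 'i += 2' ports as dropping one extra char.
def pvRunA : List Char → Bool → Bool → List Char → List String → List String
  | [], _, _, buf, refs => pvFlush buf refs
  | c :: rest, true, inClass, buf, refs =>
      if c = '\\' then pvRunA (rest.drop 1) true inClass buf refs
      else if c = '"' then pvRunA rest false inClass buf refs
      else pvRunA rest true inClass buf refs
  | c :: rest, false, true, buf, refs =>
      if c = '\\' then pvRunA (rest.drop 1) false true buf refs
      else if c = ']' then pvRunA rest false false buf refs
      else pvRunA rest false true buf refs
  | c :: rest, false, false, buf, refs =>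
      if c = '"' then pvRunA rest true false [] (pvFlush buf refs)
      else if c = '[' then pvRunA rest false true [] (pvFlush buf refs)
      else if pvTok c then pvRunA rest false false (buf ++ [c]) refs
      else pvRunA rest false false [] (pvFlush buf refs)
termination_by cs _ _ _ _ => cs.length
decreasing_by all_goals simp; try omega

def extract_refs (rhs : String) : List String :=
  pvRunA rhs.toList false false [] []

-- ===== PORT B =====
-- B's inner while loop: consume up to and including the closing char (escape skips one extra).
def pvSkip (close : Char) : List Char → List Char
  | [] => []
  | c :: rest =>
      if c = '\\' then pvSkip close (rest.drop 1)
      else if c = close then rest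
      else pvSkip close rest
termination_by cs => cs.length
decreasing_by all_goals simp; try omega

theorem pvSkip_length_le (close : Char) : ∀ cs : List Char, (pvSkip close cs).length ≤ cs.length := by
  intro cs
  induction hn : cs.length using Nat.strong_induction_on generalizing cs with
  | _ n ih =>
    match cs with
    | [] => simp [pvSkip]
    | c :: rest =>
      rw [pvSkip]
      subst hn
      split_ifs with hb hc
      · have := ih (rest.drop 1).length (by simp; try omega) (rest.drop 1) rfl
        simp at this ⊢; omega
      · simp
      · have := ih rest.length (by simp) rest rfl
        simp; omega

-- B's phase 1: each quoted string / char class becomes one space.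
def pvMask : List Char → List Char
  | [] => []
  | c :: rest =>
      if c = '"' then ' ' :: pvMask (pvSkip '"' rest)
      else if c = '[' then ' ' :: pvMask (pvSkip ']' rest)
      else c :: pvMask rest
termination_by cs => cs.length
decreasing_by
  all_goals simp
  · exact pvSkip_length_le _ _
  · exact pvSkip_length_le _ _

-- B's phase 2: stateless token scan (B's source iterates over masked + [' ']).
def pvScan : List Char → List Char → List String → List String
  | [], _, refs => refs
  | c :: rest, buf, refs =>
      if pvTok c then pvScan rest (buf ++ [c]) refs
      else pvScan rest [] (pvFlush buf refs)

def extract_refs_alt (rhs : String) : List String :=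
  pvScan (pvMask rhs.toList ++ [' ']) [] []

-- ===== PRECONDITION & SPEC =====
def Spec_extract_refs (rhs : String) (out : List String) : Prop := out = extract_refs_alt rhs
instance (rhs : String) (out : List String) : Decidable (Spec_extract_refs rhs out) := by unfold Spec_extract_refs; infer_instance

-- ===== CLAIM (what is proved, stated in full; the proofs are below) =====
def Claim_equal_extract_refs : Prop := ∀ (rhs : String), Dom_extract_refs rhs → Spec_extract_refs rhs (extract_refs rhs)

-- ===== LEMMAS AND PROOFS =====

theorem pvTok_space : pvTok ' ' = false := by decide

-- A inside a quote/class consumes exactly what pvSkip consumes.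
theorem pvRunA_quote (n : Nat) : ∀ cs : List Char, cs.length ≤ n → ∀ buf refs,
    pvRunA cs true false buf refs = pvRunA (pvSkip '"' cs) false false buf refs := by
  induction n with
  | zero => intro cs h buf refs; simp at h; subst h; simp [pvRunA, pvSkip]
  | succ n ih =>
    intro cs h buf refs
    match cs with
    | [] => simp [pvRunA, pvSkip]
    | c :: rest =>
      simp at h
      by_cases hb : c = '\\'
      · rw [pvRunA, pvSkip]; simp [hb]
        exact ih _ (by simp; omega) _ _
      · by_cases hq : c = '"'
        · rw [pvRunA, pvSkip]; simp [hq]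
        · rw [pvRunA, pvSkip]; simp [hb, hq]
          exact ih _ (by omega) _ _

theorem pvRunA_class (n : Nat) : ∀ cs : List Char, cs.length ≤ n → ∀ buf refs,
    pvRunA cs false true buf refs = pvRunA (pvSkip ']' cs) false false buf refs := by
  induction n with
  | zero => intro cs h buf refs; simp at h; subst h; simp [pvRunA, pvSkip]
  | succ n ih =>
    intro cs h buf refs
    match cs with
    | [] => simp [pvRunA, pvSkip]
    | c :: rest =>
      simp at h
      by_cases hb : c = '\\'
      · rw [pvRunA, pvSkip]; simp [hb]
        exact ih _ (by simp; omega) _ _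
      · by_cases hq : c = ']'
        · rw [pvRunA, pvSkip]; simp [hq]
        · rw [pvRunA, pvSkip]; simp [hb, hq]
          exact ih _ (by omega) _ _

theorem pvRunA_eq_scan (n : Nat) : ∀ cs : List Char, cs.length ≤ n → ∀ buf refs,
    pvRunA cs false false buf refs = pvScan (pvMask cs ++ [' ']) buf refs := by
  induction n with
  | zero =>
    intro cs h buf refs; simp at h; subst h
    simp [pvRunA, pvMask, pvScan, pvTok_space]
  | succ n ih =>
    intro cs h buf refs
    match cs with
    | [] => simp [pvRunA, pvMask, pvScan, pvTok_space]
    | c :: rest =>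
      simp at h
      by_cases hq : c = '"'
      · rw [pvRunA, pvMask]; simp [hq, pvScan, pvTok_space]
        rw [pvRunA_quote rest.length rest le_rfl]
        exact ih _ (le_trans (pvSkip_length_le _ _) h) _ _
      · by_cases hc : c = '['
        · rw [pvRunA, pvMask]; simp [hc, pvScan, pvTok_space]
          rw [pvRunA_class rest.length rest le_rfl]
          exact ih _ (le_trans (pvSkip_length_le _ _) h) _ _
        · by_cases ht : pvTok c = true
          · rw [pvRunA, pvMask]; simp [hq, hc, ht, pvScan]
            exact ih _ h _ _
          · rw [pvRunA, pvMask]; simp [hq, hc, ht, pvScan]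
            exact ih _ h _ _

-- ===== VERDICT (by name: the statement is the Claim_ definition above) =====
theorem extract_refs_spec : Claim_equal_extract_refs := by
  intro rhs _
  unfold Spec_extract_refs extract_refs extract_refs_alt
  exact pvRunA_eq_scan rhs.toList.length rhs.toList le_rfl [] []
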